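-- pv_equiv track=rewrite | github.com/zubie7a/Algorithms | CodeSignal/Challenges/Dropbox/05_Incorrect_Passcode_Attempts.py | incorrectPasscodeAttempts
-- ===== SOURCE A (Python) =====
-- def incorrectPasscodeAttempts(passcode, attempts):
--     counter = 0
--     # Check if the account should be locked. During the day a certain group
--     # of attempts were done. The account will be locked when there's 10
--     # consecutive attempts, but any single successful entry will reset
--     # the count of attempts.
--     for attempt in attempts:
--         if passcode != attempt:
--             counter += 1
--         else:
--             counter = 0
--         if counter >= 10:
--             return True
--
--     return False
-- ===== SOURCE B (Python) =====
-- def incorrectPasscodeAttempts(passcode, attempts):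
--     # Sliding-window scan: locked iff some window of 10 consecutive
--     # attempts contains no correct entry.
--     return any(
--         all(a != passcode for a in attempts[i:i + 10])
--         for i in range(len(attempts) - 9)
--     )
-- ===== Notes on version B (the rewrite author's own statement) =====
-- stated objective: alternative
-- what changed: Replaced the stateful reset-counter loop with a declarative sliding-window any/all scan over all windows of 10 consecutive attempts.
import Mathlib
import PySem

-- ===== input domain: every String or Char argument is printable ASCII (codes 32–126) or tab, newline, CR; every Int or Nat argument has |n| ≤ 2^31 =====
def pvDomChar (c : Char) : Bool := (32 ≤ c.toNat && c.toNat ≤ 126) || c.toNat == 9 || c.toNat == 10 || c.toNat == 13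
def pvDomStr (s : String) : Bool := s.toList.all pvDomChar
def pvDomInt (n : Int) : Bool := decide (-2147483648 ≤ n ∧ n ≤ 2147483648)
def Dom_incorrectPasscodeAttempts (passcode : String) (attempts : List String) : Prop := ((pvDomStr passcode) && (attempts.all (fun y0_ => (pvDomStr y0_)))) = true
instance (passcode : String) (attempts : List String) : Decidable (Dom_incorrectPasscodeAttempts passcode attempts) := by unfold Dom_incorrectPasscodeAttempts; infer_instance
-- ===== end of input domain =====

-- B replaces A's stateful reset-counter loop by a sliding-window any/all scan (alternative decomposition, same cost class).

-- ===== PORT A =====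
-- for attempt in attempts: update counter; return True as soon as counter >= 10
def pvLoopA (passcode : String) : List String → Int → Bool
  | [], _ => false
  | attempt :: rest, counter =>
    let counter := if passcode ≠ attempt then counter + 1 else 0
    if counter ≥ 10 then true else pvLoopA passcode rest counter

def incorrectPasscodeAttempts (passcode : String) (attempts : List String) : Bool :=
  pvLoopA passcode attempts 0

-- ===== PORT B =====
-- any(all(a != passcode for a in attempts[i:i+10]) for i in range(len(attempts) - 9))
def incorrectPasscodeAttempts_alt (passcode : String) (attempts : List String) : Bool :=
  (PySem.List.pyRange 0 ((attempts.length : Int) - 9) 1).any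
    (fun i => (PySem.List.slice attempts (some i) (some (i + 10))).all (fun a => a != passcode))

-- ===== PRECONDITION & SPEC =====
def Spec_incorrectPasscodeAttempts (passcode : String) (attempts : List String) (out : Bool) : Prop := out = incorrectPasscodeAttempts_alt passcode attempts
instance (passcode : String) (attempts : List String) (out : Bool) : Decidable (Spec_incorrectPasscodeAttempts passcode attempts out) := by unfold Spec_incorrectPasscodeAttempts; infer_instance

-- ===== CLAIM (what is proved, stated in full; the proofs are below) =====
def Claim_equal_incorrectPasscodeAttempts : Prop := ∀ (passcode : String) (attempts : List String), Dom_incorrectPasscodeAttempts passcode attempts → Spec_incorrectPasscodeAttempts passcode attempts (incorrectPasscodeAttempts passcode attempts)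

-- ===== LEMMAS AND PROOFS =====

-- "the first n elements exist and are all wrong"
def pvPrefOK (p : String) (n : Nat) (xs : List String) : Bool :=
  decide (n ≤ xs.length) && (xs.take n).all (fun a => a != p)

-- "some suffix starts with 10 wrong elements"
def pvWin (p : String) : List String → Bool
  | [] => false
  | x :: t => pvPrefOK p 10 (x :: t) || pvWin p t

theorem pvPrefOK_mono (p : String) (m n : Nat) (xs : List String) (h : n ≤ m)
    (hm : pvPrefOK p m xs = true) : pvPrefOK p n xs = true := by
  unfold pvPrefOK at *
  simp only [Bool.and_eq_true, decide_eq_true_eq, List.all_eq_true] at *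
  refine ⟨le_trans h hm.1, fun a ha => ?_⟩
  have he : xs.take n = (xs.take m).take n := by rw [List.take_take]; congr 1; omega
  exact hm.2 a (List.take_subset _ _ (he ▸ ha))

theorem pvPrefOK_cons_wrong (p x : String) (n : Nat) (t : List String) (h : x ≠ p) :
    pvPrefOK p (n + 1) (x :: t) = pvPrefOK p n t := by
  unfold pvPrefOK
  simp only [List.take_succ_cons, List.all_cons, List.length_cons, Nat.add_le_add_iff_right]
  rw [bne_iff_ne.mpr h, Bool.true_and]

theorem pvPrefOK_cons_right (p x : String) (n : Nat) (t : List String) (h : x = p) :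
    pvPrefOK p (n + 1) (x :: t) = false := by
  simp [pvPrefOK, h]

theorem pvWin_absorb (p : String) (t : List String) :
    (pvPrefOK p 10 t || pvWin p t) = pvWin p t := by
  cases t with
  | nil => simp [pvPrefOK]
  | cons y t' => rw [pvWin]; rw [← Bool.or_assoc, Bool.or_self]

theorem pvWin_short (p : String) (xs : List String) (h : xs.length < 10) :
    pvWin p xs = false := by
  induction xs with
  | nil => rfl
  | cons x t ih =>
    rw [pvWin]
    simp only [List.length_cons] at h
    have h1 : pvPrefOK p 10 (x :: t) = false := by
      unfold pvPrefOK
      have hd : decide (10 ≤ (x :: t).length) = false := by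
        simp only [decide_eq_false_iff_not, List.length_cons]; omega
      rw [hd, Bool.false_and]
    rw [h1, ih (by omega)]
    rfl

-- A's loop with counter c (0 ≤ c ≤ 9) returns true iff the next 10-c elements
-- are all wrong, or some full window of 10 wrong elements occurs.
theorem pvLoopA_char (p : String) : ∀ (xs : List String) (c : Nat), c ≤ 9 →
    pvLoopA p xs (c : Int) = (pvPrefOK p (10 - c) xs || pvWin p xs) := by
  intro xs
  induction xs with
  | nil =>
    intro c hc
    rw [pvLoopA, pvWin]
    have : pvPrefOK p (10 - c) [] = false := by
      unfold pvPrefOK; simp; omega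
    rw [this]; rfl
  | cons x t ih =>
    intro c hc
    rw [pvWin]
    simp only [pvLoopA]
    by_cases hw : p ≠ x
    · rw [if_pos hw]
      by_cases hc9 : c = 9
      · subst hc9
        have h10 : (((9 : Nat) : Int) + 1 ≥ 10) := by norm_num
        rw [if_pos h10]
        have hx : x ≠ p := fun he => hw he.symm
        have : pvPrefOK p (10 - 9) (x :: t) = true := by
          have e : (x :: t).take (10 - 9) = [x] := rfl
          unfold pvPrefOK
          simp [e, hx]
        rw [this]; rfl
      · have hlt : ¬ ((c : Int) + 1 ≥ 10) := by omega
        simp only [if_neg hlt]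
        have hcast : (c : Int) + 1 = ((c + 1 : Nat) : Int) := by push_cast; ring
        rw [hcast, ih (c + 1) (by omega)]
        have hx : x ≠ p := fun he => hw he.symm
        have e1 : (10 : Nat) - c = (9 - c) + 1 := by omega
        have e2 : (10 : Nat) - (c + 1) = 9 - c := by omega
        rw [e1, e2, pvPrefOK_cons_wrong p x (9 - c) t hx]
        have e3 : pvPrefOK p 10 (x :: t) = pvPrefOK p 9 t := by
          have : (10 : Nat) = 9 + 1 := rfl
          rw [this, pvPrefOK_cons_wrong p x 9 t hx]
        rw [e3]
        -- absorb pvPrefOK p 9 t into pvPrefOK p (9-c) t by monotonicity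
        cases h9 : pvPrefOK p 9 t with
        | false => simp
        | true =>
          have := pvPrefOK_mono p 9 (9 - c) t (by omega) h9
          simp [this]
    · rw [if_neg hw]
      have hx : x = p := by
        by_contra hne
        exact hw (fun he => hne he.symm)
      have hlt : ¬ ((0 : Int) ≥ 10) := by omega
      rw [if_neg hlt]
      have h0 : (0 : Int) = ((0 : Nat) : Int) := rfl
      rw [h0, ih 0 (by omega)]
      have e1 : pvPrefOK p (10 - c) (x :: t) = false := by
        have : (10 : Nat) - c = (9 - c) + 1 := by omega
        rw [this, pvPrefOK_cons_right p x (9 - c) t hx]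
      have e2 : pvPrefOK p 10 (x :: t) = false := by
        have : (10 : Nat) = 9 + 1 := rfl
        rw [this, pvPrefOK_cons_right p x 9 t hx]
      rw [e1, e2]
      simp only [Nat.sub_zero, Bool.false_or]
      exact pvWin_absorb p t

-- B equals the range/window formulation over natural indices
theorem pvAlt_char (p : String) (xs : List String) :
    incorrectPasscodeAttempts_alt p xs
      = (List.range (xs.length - 9)).any
          (fun k => ((xs.drop k).take 10).all (fun a => a != p)) := by
  unfold incorrectPasscodeAttempts_alt
  rw [PySem.List.pyRange_one]
  rw [List.any_map]
  have hlen : ((xs.length : Int) - 9 - 0).toNat = xs.length - 9 := by omega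
  rw [hlen]
  congr 1
  funext k
  simp only [Function.comp]
  have h0 : (0 : Int) + (k : Int) = (k : Int) := by ring
  rw [h0]
  have h10 : ((k : Int) + 10) = ((k : Int) + ((10 : Nat) : Int)) := by norm_num
  rw [h10, PySem.List.slice_natCast_add]

theorem pvWin_char (p : String) : ∀ (xs : List String),
    pvWin p xs = (List.range (xs.length - 9)).any
          (fun k => ((xs.drop k).take 10).all (fun a => a != p)) := by
  intro xs
  induction xs with
  | nil => rfl
  | cons x t ih =>
    rw [pvWin]
    by_cases hlong : 9 ≤ t.length
    · have e : (x :: t).length - 9 = (t.length - 9) + 1 := by simp; omega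
      rw [e, List.range_succ_eq_map, List.any_cons]
      have e1 : pvPrefOK p 10 (x :: t) = ((x :: t).take 10).all (fun a => a != p) := by
        unfold pvPrefOK
        have : decide (10 ≤ (x :: t).length) = true := by simp; omega
        rw [this, Bool.true_and]
      have e2 : ((List.range (t.length - 9)).map (· + 1)).any
            (fun k => (((x :: t).drop k).take 10).all (fun a => a != p))
          = (List.range (t.length - 9)).any
            (fun k => ((t.drop k).take 10).all (fun a => a != p)) := by
        rw [List.any_map]
        apply congrArg
        funext k
        simp [Function.comp]
      rw [e1, ih, List.drop_zero, e2]
    · have e : (x :: t).length - 9 = 0 := by simp; omega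
      rw [e]
      have h1 : pvPrefOK p 10 (x :: t) = false := by
        unfold pvPrefOK
        have hd : decide (10 ≤ (x :: t).length) = false := by
          simp only [decide_eq_false_iff_not, List.length_cons]; omega
        rw [hd, Bool.false_and]
      rw [h1, pvWin_short p t (by omega)]
      rfl

-- ===== VERDICT (by name: the statement is the Claim_ definition above) =====
theorem incorrectPasscodeAttempts_spec : Claim_equal_incorrectPasscodeAttempts := by
  intro p xs _
  unfold Spec_incorrectPasscodeAttempts incorrectPasscodeAttempts
  have h0 : (0 : Int) = ((0 : Nat) : Int) := rfl
  rw [h0, pvLoopA_char p xs 0 (by omega), Nat.sub_zero, pvWin_absorb p xs,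
    pvWin_char, ← pvAlt_char]
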